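-- pv_equiv track=rewrite | github.com/CelioSlomp/Faculdade | Algoritmos/Lista7_Algoritmos/CLS-alg-7-Ex-09.py | verColuna
-- ===== SOURCE A (Python) =====
-- def verColuna(dici: dict, numeros: list):
--     for i in dici:
--         soma = 0
--         for j in range(0, len(dici[i])):
--             if dici[i][j] in numeros:
--                 dici[i][j] = 0
--             else:
--                 soma += dici[i][j]
--         if soma == 0:
--             return True
--     return False
-- ===== SOURCE B (Python) =====
-- def verColuna(dici: dict, numeros: list):
--     # Return-value equivalent to A (A also zeroes matched cells of dici in
--     # place; B performs no mutation). Different decomposition: a column passes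
--     # iff its total sum equals the sum of its elements found in numeros
--     # (total - matched == 0), checked by recursion over the column list.
--     def check(cols):
--         if not cols:
--             return False
--         col = cols[0]
--         total = sum(col)
--         matched = sum(x for x in col if x in numeros)
--         return total == matched or check(cols[1:])
--     return check(list(dici.values()))
-- ===== Notes on version B (the rewrite author's own statement) =====
-- stated objective: alternative
-- what changed: B replaces A's in-place zeroing plus unmatched-accumulator-equals-zero test by the arithmetic identity total-sum == matched-sum per column, and the early-return outer loop by recursion over the list of columns, without mutating the input.
import Mathlib
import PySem

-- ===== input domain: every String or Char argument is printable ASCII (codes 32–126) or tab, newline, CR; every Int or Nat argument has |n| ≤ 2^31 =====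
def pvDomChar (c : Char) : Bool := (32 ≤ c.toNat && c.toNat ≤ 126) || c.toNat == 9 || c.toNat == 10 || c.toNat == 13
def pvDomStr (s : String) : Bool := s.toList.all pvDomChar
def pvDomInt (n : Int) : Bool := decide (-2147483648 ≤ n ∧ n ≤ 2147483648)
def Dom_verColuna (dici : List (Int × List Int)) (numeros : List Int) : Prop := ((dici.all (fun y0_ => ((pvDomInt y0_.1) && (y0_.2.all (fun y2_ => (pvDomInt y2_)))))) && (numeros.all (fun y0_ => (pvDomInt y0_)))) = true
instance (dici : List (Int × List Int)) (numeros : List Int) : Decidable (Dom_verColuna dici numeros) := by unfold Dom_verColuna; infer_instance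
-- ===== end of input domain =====

-- B tests each column by 'total sum == matched sum' via recursion over the column list,
-- with no mutation; A additionally zeroes matched cells of dici in place (a side effect
-- not modelled here — the equivalence proved is about the return value).

-- ===== PORT A =====
-- inner 'for j in range(0, len(dici[i]))' loop: state = (current column contents, soma);
-- every index produced by the range is in bounds, so pyGetD/pySetD are exact here.
def verColunaInner (numeros : List Int) (st : List Int × Int) (j : Int) : List Int × Int :=
  let v := PySem.List.pyGetD st.1 j 0
  if numeros.contains v then (PySem.List.pySetD st.1 j 0, st.2)
  else (st.1, st.2 + v)

def verColuna (dici : List (Int × List Int)) (numeros : List Int) : Bool :=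
  match dici with
  | [] => false
  | (_, col) :: rest =>
    let r := (PySem.List.pyRange 0 (col.length : Int) 1).foldl (verColunaInner numeros) (col, 0)
    if r.2 = 0 then true else verColuna rest numeros

-- ===== PORT B =====
-- 'check(cols)': recursion over the list of columns
def verColunaCheck (numeros : List Int) : List (List Int) → Bool
  | [] => false
  | col :: rest =>
    (col.sum == (col.filter (fun x => numeros.contains x)).sum) || verColunaCheck numeros rest

def verColuna_alt (dici : List (Int × List Int)) (numeros : List Int) : Bool :=
  verColunaCheck numeros (dici.map Prod.snd)

-- ===== PRECONDITION & SPEC =====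
def Spec_verColuna (dici : List (Int × List Int)) (numeros : List Int) (out : Bool) : Prop := out = verColuna_alt dici numeros
instance (dici : List (Int × List Int)) (numeros : List Int) (out : Bool) : Decidable (Spec_verColuna dici numeros out) := by unfold Spec_verColuna; infer_instance

-- ===== CLAIM (what is proved, stated in full; the proofs are below) =====
def Claim_equal_verColuna : Prop := ∀ (dici : List (Int × List Int)) (numeros : List Int), Dom_verColuna dici numeros → Spec_verColuna dici numeros (verColuna dici numeros)

-- ===== LEMMAS AND PROOFS =====

-- Invariant of A's inner loop: having processed the prefix 'pre', folding the remaining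
-- indices over pre ++ c adds exactly the sum of the unmatched elements of c to soma.
lemma verColunaInner_invariant (numeros : List Int) (c : List Int) :
    ∀ (pre : List Int) (s : Int),
      ((PySem.List.pyRange (pre.length : Int) ((pre.length : Int) + (c.length : Int)) 1).foldl
        (verColunaInner numeros) (pre ++ c, s)).2
      = s + (c.filter (fun x => !numeros.contains x)).sum := by
  induction c with
  | nil => intro pre s; simp
  | cons v c' ih =>
    intro pre s
    rw [PySem.List.pyRange_one_cons (by simp)]
    simp only [List.foldl_cons]
    have hget : PySem.List.pyGetD (pre ++ v :: c') (pre.length : Int) 0 = v := by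
      simp [PySem.List.pyGetD_natCast, List.getD]
    have hset : PySem.List.pySetD (pre ++ v :: c') (pre.length : Int) 0 = pre ++ 0 :: c' := by
      simp [PySem.List.pySetD_natCast]
    by_cases hv : v ∈ numeros
    · have h1 : ((pre.length : Int) + 1) = (((pre ++ [(0 : Int)]).length : Int)) := by
        simp
      have h2 : ((pre.length : Int) + ((v :: c').length : Int))
          = (((pre ++ [(0 : Int)]).length : Int) + (c'.length : Int)) := by
        simp; ring
      rw [show verColunaInner numeros (pre ++ v :: c', s) (pre.length : Int)
            = (pre ++ 0 :: c', s) by simp [verColunaInner, hget, hset, hv]]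
      rw [show (pre ++ (0 : Int) :: c', s) = ((pre ++ [(0 : Int)]) ++ c', s) by simp]
      rw [h2, h1, ih (pre ++ [0]) s]
      simp [hv]
    · have h1 : ((pre.length : Int) + 1) = (((pre ++ [v]).length : Int)) := by
        simp
      have h2 : ((pre.length : Int) + ((v :: c').length : Int))
          = (((pre ++ [v]).length : Int) + (c'.length : Int)) := by
        simp; ring
      rw [show verColunaInner numeros (pre ++ v :: c', s) (pre.length : Int)
            = (pre ++ v :: c', s + v) by simp [verColunaInner, hget, hv]]
      rw [show (pre ++ v :: c', s + v) = ((pre ++ [v]) ++ c', s + v) by simp]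
      rw [h2, h1, ih (pre ++ [v]) (s + v)]
      simp [hv]; ring

lemma verColunaInner_sum (numeros : List Int) (col : List Int) :
    ((PySem.List.pyRange 0 (col.length : Int) 1).foldl (verColunaInner numeros) (col, 0)).2
      = (col.filter (fun x => !numeros.contains x)).sum := by
  have h := verColunaInner_invariant numeros col [] 0
  simpa using h

-- Arithmetic bridge: unmatched sum is zero iff the total equals the matched sum.
lemma filter_not_sum_eq_zero_iff (numeros : List Int) (col : List Int) :
    ((col.filter (fun x => !decide (x ∈ numeros))).sum = 0)
      ↔ (col.sum = (col.filter (fun x => decide (x ∈ numeros))).sum) := by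
  have hsplit : (col.filter (fun x => decide (x ∈ numeros))).sum
      + (col.filter (fun x => !decide (x ∈ numeros))).sum = col.sum := by
    induction col with
    | nil => simp
    | cons v c ih =>
      by_cases hv : v ∈ numeros <;> simp [List.filter_cons, hv] <;> omega
  omega

lemma verColuna_eq_alt (dici : List (Int × List Int)) (numeros : List Int) :
    verColuna dici numeros = verColuna_alt dici numeros := by
  induction dici with
  | nil => rfl
  | cons kv rest ih =>
    obtain ⟨k, col⟩ := kv
    simp only [verColuna, verColuna_alt, List.map_cons, verColunaCheck,
      verColunaInner_sum numeros col]
    rw [show verColunaCheck numeros (rest.map Prod.snd) = verColuna rest numeros from ih.symm]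
    simp only [List.contains_eq_mem]
    by_cases h : (col.filter (fun x => !decide (x ∈ numeros))).sum = 0
    · simp [h, (filter_not_sum_eq_zero_iff numeros col).mp h]
    · have h2 : ¬ col.sum = (col.filter (fun x => decide (x ∈ numeros))).sum := by
        intro hc; exact h ((filter_not_sum_eq_zero_iff numeros col).mpr hc)
      simp [h, h2]

-- ===== VERDICT (by name: the statement is the Claim_ definition above) =====
theorem verColuna_spec : Claim_equal_verColuna := by
  intro dici numeros _
  exact verColuna_eq_alt dici numeros
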